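-- pv_equiv track=rewrite | github.com/stanfordnlp/phrasal | ptm/wmt-rank/compute_agreement_scores.py | compute_agreement_scores
-- ===== SOURCE A (Python) =====
-- from collections import defaultdict
-- from itertools import combinations
--
-- def compute_agreement_scores(data):
--     """
--     Computes agreement scores for the given data set.
--     """
--     # Make triples accessible by item id.
--     _by_items = defaultdict(list)
--     for _unused_coder_name, item, labels in data:
--         _by_items[item].append(labels) # We only need the labels here.
--
--     try:
--         identical_cnt = 0
--         comparable_cnt = 0
--         ties_cnt = 0
--         ties_total = 0
--
--         for item_labels in _by_items.values():
--             ties_total += len(item_labels)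
--
--             for individual_label in item_labels:
--                 if '=' in individual_label:
--                     ties_cnt += 1
--
--             # cfedermann: combinations() throws a ValueError if x does not
--             # contain two or more elements when using Python 2.6;  hence we
--             # check length of x before using it ;)
--             if len(item_labels) > 1:
--                 for first_label, second_label in combinations(item_labels, 2):
--                     if first_label == second_label:
--                         identical_cnt += 1
--                     comparable_cnt += 1
--
--         return (identical_cnt, comparable_cnt, ties_cnt, ties_total)
--
--     except:
--         from traceback import print_exc
--         print_exc()
-- ===== SOURCE B (Python) =====
-- def compute_agreement_scores(data):
--     """
--     Computes agreement scores for the given data set.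
--     """
--     # One pass: for each new judgment, the number of earlier judgments on the
--     # same item is its contribution to comparable pairs, and the number of
--     # earlier identical (item, labels) judgments its contribution to identical
--     # pairs -- no per-item pair enumeration needed.
--     label_freq = {}   # (item, labels) -> occurrences seen so far
--     item_size = {}    # item -> judgments seen so far
--     identical_cnt = 0
--     comparable_cnt = 0
--     ties_cnt = 0
--     ties_total = 0
--     for _unused_coder_name, item, labels in data:
--         f = label_freq.get((item, labels), 0)
--         n = item_size.get(item, 0)
--         identical_cnt += f
--         comparable_cnt += n
--         label_freq[(item, labels)] = f + 1
--         item_size[item] = n + 1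
--         if '=' in labels:
--             ties_cnt += 1
--         ties_total += 1
--     return (identical_cnt, comparable_cnt, ties_cnt, ties_total)
-- ===== Notes on version B (the rewrite author's own statement) =====
-- stated objective: faster
-- what changed: Replaces the group-then-enumerate-all-pairs pass (itertools.combinations per item, quadratic in the item's judgment count) by a single pass over the data that, for each judgment, adds the number of earlier judgments on the same item (comparable) and the number of earlier identical (item,labels) judgments (identical), maintained in two hash counters.
import Mathlib
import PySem

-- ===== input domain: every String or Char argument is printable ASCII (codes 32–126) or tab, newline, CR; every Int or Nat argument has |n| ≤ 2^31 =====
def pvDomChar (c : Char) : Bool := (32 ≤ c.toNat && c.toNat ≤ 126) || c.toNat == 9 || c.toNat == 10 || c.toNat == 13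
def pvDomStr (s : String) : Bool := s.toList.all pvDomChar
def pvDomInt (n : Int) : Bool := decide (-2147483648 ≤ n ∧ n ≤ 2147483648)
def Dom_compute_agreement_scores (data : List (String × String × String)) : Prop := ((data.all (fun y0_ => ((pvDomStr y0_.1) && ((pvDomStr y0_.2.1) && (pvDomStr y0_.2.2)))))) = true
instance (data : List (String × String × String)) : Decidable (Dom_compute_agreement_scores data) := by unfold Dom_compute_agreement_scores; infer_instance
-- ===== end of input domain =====

-- B replaces A's per-item enumeration of all label pairs (itertools.combinations) by one pass
-- over the data with two hash counters, intended to be faster on items with many judgments.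
-- Python A returns a 4-tuple; both ports return it as the 4-element List Int [identical, comparable, ties, ties_total].

-- ===== PORT A =====
-- inner 'for first_label, second_label in combinations(item_labels, 2)' loop body
def pvACombStep (p : Int × Int) (c : List String) : Int × Int :=
  match c with
  | [a, b] => (if a == b then p.1 + 1 else p.1, p.2 + 1)
  | _ => p

-- body of 'for item_labels in _by_items.values()'
def pvAStep (s : Int × Int × Int × Int) (g : List String) : Int × Int × Int × Int :=
  let total := s.2.2.2 + (g.length : Int)
  let ties := g.foldl (fun t lab => if PySem.Str.isIn "=" lab then t + 1 else t) s.2.2.1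
  let ic :=
    if 1 < g.length then
      (PySem.List.combinations g 2).foldl pvACombStep (s.1, s.2.1)
    else (s.1, s.2.1)
  (ic.1, ic.2, ties, total)

def compute_agreement_scores (data : List (String × String × String)) : List Int :=
  let byItems := data.foldl (fun d t => PySem.Dict.modify d t.2.1 [] (fun g => g ++ [t.2.2])) PySem.Dict.empty
  let r := byItems.values.foldl pvAStep (0, 0, 0, 0)
  [r.1, r.2.1, r.2.2.1, r.2.2.2]

-- ===== PORT B =====
-- state: (label_freq, item_size, identical_cnt, comparable_cnt, ties_cnt, ties_total)
def pvBStep (s : PySem.Dict (String × String) Int × PySem.Dict String Int × Int × Int × Int × Int)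
    (t : String × String × String) :
    PySem.Dict (String × String) Int × PySem.Dict String Int × Int × Int × Int × Int :=
  let f := s.1.getD (t.2.1, t.2.2) 0
  let n := s.2.1.getD t.2.1 0
  let ident := s.2.2.1 + f
  let comp := s.2.2.2.1 + n
  let freq := s.1.insert (t.2.1, t.2.2) (f + 1)
  let size := s.2.1.insert t.2.1 (n + 1)
  let ties := if PySem.Str.isIn "=" t.2.2 then s.2.2.2.2.1 + 1 else s.2.2.2.2.1
  (freq, size, ident, comp, ties, s.2.2.2.2.2 + 1)

def compute_agreement_scores_alt (data : List (String × String × String)) : List Int :=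
  let r := data.foldl pvBStep (PySem.Dict.empty, PySem.Dict.empty, 0, 0, 0, 0)
  [r.2.2.1, r.2.2.2.1, r.2.2.2.2.1, r.2.2.2.2.2]

-- ===== PRECONDITION & SPEC =====
def Spec_compute_agreement_scores (data : List (String × String × String)) (out : List Int) : Prop := out = compute_agreement_scores_alt data
instance (data : List (String × String × String)) (out : List Int) : Decidable (Spec_compute_agreement_scores data out) := by unfold Spec_compute_agreement_scores; infer_instance

-- ===== CLAIM (what is proved, stated in full; the proofs are below) =====
def Claim_equal_compute_agreement_scores : Prop := ∀ (data : List (String × String × String)), Dom_compute_agreement_scores data → Spec_compute_agreement_scores data (compute_agreement_scores data)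

-- ===== LEMMAS AND PROOFS =====

-- item key and (item, labels) key of a data row
def pvKI (t : String × String × String) : String := t.2.1
def pvKP (t : String × String × String) : String × String := (t.2.1, t.2.2)

-- number of unordered pairs i < j of positions of l with P l[i] l[j]
def pvPairCnt {α : Type} (P : α → α → Bool) : List α → Nat
  | [] => 0
  | x :: xs => xs.countP (P x) + pvPairCnt P xs

def pvPeq (x y : String × String × String) : Bool := pvKP x == pvKP y
def pvPit (x y : String × String × String) : Bool := pvKI x == pvKI y
def pvTie (t : String × String × String) : Bool := PySem.Str.isIn "=" t.2.2

-- the common closed form both programs compute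
def pvScore (data : List (String × String × String)) : List Int :=
  [(pvPairCnt pvPeq data : Int), (pvPairCnt pvPit data : Int), (data.countP pvTie : Int), (data.length : Int)]

-- ---- generic pair-count facts ----
lemma pvPairCnt_congr {α : Type} (P Q : α → α → Bool) (l : List α)
    (h : ∀ x ∈ l, ∀ y ∈ l, P x y = Q x y) : pvPairCnt P l = pvPairCnt Q l := by
  induction l with
  | nil => rfl
  | cons x xs ih =>
    simp only [pvPairCnt]
    rw [show xs.countP (P x) = xs.countP (Q x) from
          List.countP_congr (fun y hy => by
            simp [h x (by simp) y (List.mem_cons_of_mem _ hy)]),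
        ih (fun a ha b hb => h a (by simp [ha]) b (by simp [hb]))]

lemma pvPairCnt_map {α β : Type} (Q : β → β → Bool) (f : α → β) (l : List α) :
    pvPairCnt Q (l.map f) = pvPairCnt (fun x y => Q (f x) (f y)) l := by
  induction l with
  | nil => rfl
  | cons x xs ih => simp only [List.map_cons, pvPairCnt, List.countP_map, ih]; rfl

lemma pvCountP_split {α : Type} (p q : α → Bool) (l : List α) :
    l.countP p = (l.filter q).countP p + (l.filter (fun x => !q x)).countP p := by
  simp only [List.countP_filter]
  induction l with
  | nil => rfl
  | cons x xs ih => by_cases h : q x = true <;> simp [List.countP_cons, h, ih] <;> omega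

lemma pvLength_split {α : Type} (q : α → Bool) (l : List α) :
    l.length = (l.filter q).length + (l.filter (fun x => !q x)).length := by
  induction l with
  | nil => rfl
  | cons x xs ih => by_cases h : q x = true <;> simp [List.filter_cons, h, ih] <;> omega

lemma pvPairCnt_split {α : Type} (P : α → α → Bool) (q : α → Bool) (l : List α)
    (hcomp : ∀ x y, P x y = true → q x = q y) :
    pvPairCnt P l = pvPairCnt P (l.filter q) + pvPairCnt P (l.filter (fun x => !q x)) := by
  induction l with
  | nil => rfl
  | cons x xs ih =>
    have key : ∀ b, q x = b → (xs.filter (fun y => q y == b)).countP (P x) = xs.countP (P x) := by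
      intro b hb
      rw [List.countP_filter]
      apply List.countP_congr
      intro y _
      by_cases hp : P x y = true
      · have hq := hcomp x y hp
        simp [hp, ← hq, hb]
      · simp [hp]
    by_cases h : q x = true
    · have h2 : (fun y => q y == true) = q := by funext y; by_cases hy : q y = true <;> simp [hy]
      have := key true h
      rw [h2] at this
      simp [pvPairCnt, List.filter_cons, h, ih, this]
      omega
    · have hfx : q x = false := by simpa using h
      have h2 : (fun y => q y == false) = (fun y => !q y) := by
        funext y; by_cases hy : q y = true <;> simp [hy]
      have := key false hfx
      rw [h2] at this
      simp [pvPairCnt, List.filter_cons, hfx, ih, this]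
      omega

-- ---- Set.ofList peeling ----
lemma pvFoldlAdd_skip {α : Type} [BEq α] [LawfulBEq α] (t : List α) :
    ∀ (s : List α) (a : α), a ∈ s →
      t.foldl PySem.Set.add s = (t.filter (fun x => x != a)).foldl PySem.Set.add s := by
  induction t with
  | nil => intros; rfl
  | cons b t ih =>
    intro s a ha
    by_cases hb : b = a
    · subst hb
      have : PySem.Set.add s b = s := by
        simp [PySem.Set.add, PySem.Set.contains, ha]
      simp [List.filter_cons, this, ih s b ha]
    · have : (b != a) = true := by simp [hb]
      simp only [List.foldl_cons, List.filter_cons, this, cond_true]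
      exact ih _ a (by
        simp [PySem.Set.add]
        split <;> simp [ha])

lemma pvFoldlAdd_cons {α : Type} [BEq α] [LawfulBEq α] (t : List α) :
    ∀ (s : List α) (x : α), x ∉ t →
      t.foldl PySem.Set.add (x :: s) = x :: t.foldl PySem.Set.add s := by
  induction t with
  | nil => intros; rfl
  | cons b t ih =>
    intro s x hx
    have hbx : (b == x) = false := by
      simp only [List.mem_cons, not_or] at hx
      exact beq_eq_false_iff_ne.mpr (fun h => hx.1 h.symm)
    have : PySem.Set.add (x :: s) b = x :: PySem.Set.add s b := by
      simp [PySem.Set.add, PySem.Set.contains, List.contains_cons, hbx]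
      split <;> simp
    simp only [List.foldl_cons, this]
    exact ih _ x (by simp only [List.mem_cons, not_or] at hx; exact hx.2)

lemma pvOfList_cons {α : Type} [BEq α] [LawfulBEq α] (a : α) (t : List α) :
    PySem.Set.ofList (a :: t) = a :: PySem.Set.ofList (t.filter (fun x => x != a)) := by
  have h1 : PySem.Set.ofList (a :: t) = t.foldl PySem.Set.add [a] := by
    rw [PySem.Set.ofList_eq_foldl]
    rfl
  rw [h1, pvFoldlAdd_skip t [a] a (by simp)]
  rw [pvFoldlAdd_cons _ _ _ (by simp), PySem.Set.ofList_eq_foldl]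

-- ---- the partition lemma ----
lemma pvPartitionAux (F : List (String × String × String) → Int) (hnil : F [] = 0)
    (hsplit : ∀ l k, F l = F (l.filter (fun t => pvKI t == k)) + F (l.filter (fun t => !(pvKI t == k)))) :
    ∀ (n : Nat) (l : List (String × String × String)), l.length ≤ n →
      ((PySem.Set.ofList (l.map pvKI)).map (fun k => F (l.filter (fun t => pvKI t == k)))).sum = F l := by
  intro n
  induction n with
  | zero =>
    intro l hl
    have : l = [] := List.length_eq_zero_iff.mp (Nat.le_zero.mp hl)
    subst this
    simpa [PySem.Set.ofList] using hnil.symm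
  | succ n ih =>
    intro l hl
    match l with
    | [] => simpa [PySem.Set.ofList] using hnil.symm
    | x :: xs =>
      have hfx : ((x :: xs).filter (fun t => !(pvKI t == pvKI x))) = xs.filter (fun t => !(pvKI t == pvKI x)) := by
        simp [List.filter_cons]
      have hmap : (xs.map pvKI).filter (fun z => z != pvKI x)
          = (xs.filter (fun t => !(pvKI t == pvKI x))).map pvKI := by
        rw [List.filter_map]; rfl
      have hS : PySem.Set.ofList ((x :: xs).map pvKI) =
          pvKI x :: PySem.Set.ofList ((xs.filter (fun t => !(pvKI t == pvKI x))).map pvKI) := by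
        rw [List.map_cons, pvOfList_cons, hmap]
      rw [hS, List.map_cons, List.sum_cons]
      have hmem : ∀ k ∈ PySem.Set.ofList ((xs.filter (fun t => !(pvKI t == pvKI x))).map pvKI), k ≠ pvKI x := by
        intro k hk
        have hk2 := (PySem.Set.mem_ofList _ _).mp hk
        rw [← hmap] at hk2
        simpa using (List.of_mem_filter hk2)
      have hcongr : ∀ k ∈ PySem.Set.ofList ((xs.filter (fun t => !(pvKI t == pvKI x))).map pvKI),
          F ((x :: xs).filter (fun t => pvKI t == k))
            = F ((xs.filter (fun t => !(pvKI t == pvKI x))).filter (fun t => pvKI t == k)) := by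
        intro k hk
        have hkne := hmem k hk
        congr 1
        rw [List.filter_filter]
        rw [List.filter_cons]
        have hx : (pvKI x == k) = false := beq_eq_false_iff_ne.mpr (fun h => hkne h.symm)
        simp only [hx, cond_false, Bool.false_eq_true, if_false]
        apply List.filter_congr
        intro t _
        by_cases ht : pvKI t = k
        · have : (pvKI t == pvKI x) = false := beq_eq_false_iff_ne.mpr (fun h => hkne ((ht ▸ h) : k = pvKI x))
          simp [ht, this]
          exact hkne
        · simp [ht]
      rw [List.map_congr_left hcongr]
      have hlen : (xs.filter (fun t => !(pvKI t == pvKI x))).length ≤ n := by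
        have h1 := List.length_filter_le (fun t => !(pvKI t == pvKI x)) xs
        simp only [List.length_cons] at hl
        omega
      rw [ih _ hlen]
      have hs := hsplit (x :: xs) (pvKI x)
      rw [hfx] at hs
      omega

-- ---- A side ----
lemma pvA_comb_inner (x : String) (xs : List String) (p : Int × Int) :
    xs.foldl (fun a y => pvACombStep a [x, y]) p
      = (p.1 + (xs.countP (fun y => x == y) : Int), p.2 + (xs.length : Int)) := by
  induction xs generalizing p with
  | nil => simp
  | cons y ys ih =>
    rw [List.foldl_cons, ih]
    simp only [pvACombStep, List.countP_cons, List.length_cons, Prod.ext_iff]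
    by_cases h : (x == y) = true <;> simp [h] <;> push_cast <;> omega

lemma pvA_comb (g : List String) (p : Int × Int) :
    (PySem.List.combinations g 2).foldl pvACombStep p
      = (p.1 + (pvPairCnt (fun a b => a == b) g : Int), p.2 + (pvPairCnt (fun _ _ => true) g : Int)) := by
  induction g generalizing p with
  | nil => simp [PySem.List.combinations_nil_succ, pvPairCnt]
  | cons x xs ih =>
    rw [PySem.List.combinations_cons_succ, PySem.List.combinations_one, List.foldl_append,
        List.map_map]
    have : (xs.map ((x :: ·) ∘ (fun y => [y]))).foldl pvACombStep p
        = xs.foldl (fun a y => pvACombStep a [x, y]) p := by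
      rw [List.foldl_map]; rfl
    rw [this, pvA_comb_inner, ih]
    simp only [pvPairCnt, List.countP_true, Prod.ext_iff]
    constructor <;> push_cast <;> ring

lemma pvA_step (s : Int × Int × Int × Int) (g : List String) :
    pvAStep s g = (s.1 + (pvPairCnt (fun a b => a == b) g : Int),
                   s.2.1 + (pvPairCnt (fun _ _ => true) g : Int),
                   s.2.2.1 + (g.countP (fun lab => PySem.Str.isIn "=" lab) : Int),
                   s.2.2.2 + (g.length : Int)) := by
  unfold pvAStep
  rw [PySem.List.foldl_if_add_one]
  by_cases h : 1 < g.length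
  · simp only [h, if_true, pvA_comb]
  · match g, h with
    | [], _ => simp [pvPairCnt]
    | [a], _ => simp [pvPairCnt]
    | a :: b :: gs, h => exact absurd (by simp) h

def pvGsum (f : List String → Int) (gs : List (List String)) : Int := (gs.map f).sum

lemma pvA_fold (gs : List (List String)) :
    ∀ (s : Int × Int × Int × Int),
      gs.foldl pvAStep s = (s.1 + pvGsum (fun g => (pvPairCnt (fun a b => a == b) g : Int)) gs,
                            s.2.1 + pvGsum (fun g => (pvPairCnt (fun _ _ => true) g : Int)) gs,
                            s.2.2.1 + pvGsum (fun g => (g.countP (fun lab => PySem.Str.isIn "=" lab) : Int)) gs,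
                            s.2.2.2 + pvGsum (fun g => (g.length : Int)) gs) := by
  induction gs with
  | nil => intro s; simp [pvGsum]
  | cons g gs ih =>
    intro s
    rw [List.foldl_cons, pvA_step, ih]
    simp only [pvGsum, List.map_cons, List.sum_cons, Prod.ext_iff]
    refine ⟨by ring, by ring, by ring, by ring⟩

lemma pvA_vals (data : List (String × String × String)) :
    (data.foldl (fun d t => PySem.Dict.modify d t.2.1 [] (fun g => g ++ [t.2.2])) PySem.Dict.empty).values
      = (PySem.Set.ofList (data.map pvKI)).map
          (fun k => (data.filter (fun t => pvKI t == k)).map (fun t => t.2.2)) := by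
  have hnd : (data.foldl (fun d t => PySem.Dict.modify d t.2.1 [] (fun g => g ++ [t.2.2])) PySem.Dict.empty).keys.Nodup := by
    exact PySem.Dict.nodup_keys_foldl_modify_key data (fun t => t.2.1) [] (fun d t => fun g => g ++ [t.2.2]) PySem.Dict.empty (by simp [PySem.Dict.nodup_keys_empty])
  have hkeys : (data.foldl (fun d t => PySem.Dict.modify d t.2.1 [] (fun g => g ++ [t.2.2])) PySem.Dict.empty).keys
      = PySem.Set.ofList (data.map pvKI) := by
    rw [PySem.Dict.keys_foldl_modify_key]
    rfl
  have hget : ∀ k, (data.foldl (fun d t => PySem.Dict.modify d t.2.1 [] (fun g => g ++ [t.2.2])) PySem.Dict.empty).getD k []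
      = (data.filter (fun t => pvKI t == k)).map (fun t => t.2.2) := by
    intro k
    have hmap : data.foldl (fun d t => PySem.Dict.modify d t.2.1 [] (fun g => g ++ [t.2.2])) PySem.Dict.empty
        = (data.map (fun t => (t.2.1, t.2.2))).foldl (fun d p => PySem.Dict.modify d p.1 [] (fun g => g ++ [p.2])) PySem.Dict.empty := by
      rw [List.foldl_map]
    rw [hmap, PySem.Dict.getD_foldl_modify_append, List.filter_map, List.map_map]
    rfl
  rw [PySem.Dict.values_eq_map_keys _ hnd [], hkeys]
  exact List.map_congr_left (fun k _ => hget k)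

lemma pvGroup_id (l : List (String × String × String)) (k : String) :
    pvPairCnt (fun a b => a == b) ((l.filter (fun t => pvKI t == k)).map (fun t => t.2.2))
      = pvPairCnt pvPeq (l.filter (fun t => pvKI t == k)) := by
  rw [pvPairCnt_map]
  apply pvPairCnt_congr
  intro x hx y hy
  have hx1 : x.2.1 = k := by simpa [pvKI] using List.of_mem_filter hx
  have hy1 : y.2.1 = k := by simpa [pvKI] using List.of_mem_filter hy
  simp [pvPeq, pvKP, hx1, hy1]

lemma pvGroup_comp (l : List (String × String × String)) (k : String) :
    pvPairCnt (fun (_ _ : String) => true) ((l.filter (fun t => pvKI t == k)).map (fun t => t.2.2))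
      = pvPairCnt pvPit (l.filter (fun t => pvKI t == k)) := by
  rw [pvPairCnt_map]
  apply pvPairCnt_congr
  intro x hx y hy
  have hx1 : x.2.1 = k := by simpa [pvKI] using List.of_mem_filter hx
  have hy1 : y.2.1 = k := by simpa [pvKI] using List.of_mem_filter hy
  simp [pvPit, pvKI, hx1, hy1]

lemma pvA_eq_score (data : List (String × String × String)) :
    compute_agreement_scores data = pvScore data := by
  show [((((data.foldl (fun d t => PySem.Dict.modify d t.2.1 [] (fun g => g ++ [t.2.2])) PySem.Dict.empty).values).foldl pvAStep (0,0,0,0))).1, _, _, _] = _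
  rw [pvA_vals, pvA_fold]
  have e1 : pvGsum (fun g => (pvPairCnt (fun a b => a == b) g : Int))
        ((PySem.Set.ofList (data.map pvKI)).map (fun k => (data.filter (fun t => pvKI t == k)).map (fun t => t.2.2)))
      = (pvPairCnt pvPeq data : Int) := by
    unfold pvGsum
    rw [List.map_map]
    rw [List.map_congr_left (g := fun k => (pvPairCnt pvPeq (data.filter (fun t => pvKI t == k)) : Int)) (fun k _ => by
      simp only [Function.comp_apply, pvGroup_id])]
    exact pvPartitionAux (fun l => (pvPairCnt pvPeq l : Int)) (by simp [pvPairCnt])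
      (fun l k => by
        have := pvPairCnt_split pvPeq (fun t => pvKI t == k) l
          (fun x y hxy => by
            have : pvKP x = pvKP y := by simpa [pvPeq] using hxy
            have : pvKI x = pvKI y := by
              simp only [pvKP, Prod.mk.injEq] at this
              simp [pvKI, this.1]
            show (pvKI x == k) = (pvKI y == k)
            rw [this])
        push_cast [this]; ring)
      data.length data le_rfl
  have e2 : pvGsum (fun g => (pvPairCnt (fun (_ _ : String) => true) g : Int))
        ((PySem.Set.ofList (data.map pvKI)).map (fun k => (data.filter (fun t => pvKI t == k)).map (fun t => t.2.2)))
      = (pvPairCnt pvPit data : Int) := by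
    unfold pvGsum
    rw [List.map_map]
    rw [List.map_congr_left (g := fun k => (pvPairCnt pvPit (data.filter (fun t => pvKI t == k)) : Int)) (fun k _ => by
      simp only [Function.comp_apply, pvGroup_comp])]
    exact pvPartitionAux (fun l => (pvPairCnt pvPit l : Int)) (by simp [pvPairCnt])
      (fun l k => by
        have := pvPairCnt_split pvPit (fun t => pvKI t == k) l
          (fun x y hxy => by
            have : pvKI x = pvKI y := by simpa [pvPit] using hxy
            show (pvKI x == k) = (pvKI y == k)
            rw [this])
        push_cast [this]; ring)
      data.length data le_rfl
  have e3 : pvGsum (fun g => (g.countP (fun lab => PySem.Str.isIn "=" lab) : Int))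
        ((PySem.Set.ofList (data.map pvKI)).map (fun k => (data.filter (fun t => pvKI t == k)).map (fun t => t.2.2)))
      = (data.countP pvTie : Int) := by
    unfold pvGsum
    rw [List.map_map]
    rw [List.map_congr_left (g := fun k => ((data.filter (fun t => pvKI t == k)).countP pvTie : Int)) (fun k _ => by
      simp only [Function.comp_apply, List.countP_map]
      rfl)]
    exact pvPartitionAux (fun l => (l.countP pvTie : Int)) (by simp)
      (fun l k => by
        have := pvCountP_split pvTie (fun t => pvKI t == k) l
        push_cast [this]; ring)
      data.length data le_rfl
  have e4 : pvGsum (fun g => (g.length : Int))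
        ((PySem.Set.ofList (data.map pvKI)).map (fun k => (data.filter (fun t => pvKI t == k)).map (fun t => t.2.2)))
      = (data.length : Int) := by
    unfold pvGsum
    rw [List.map_map]
    rw [List.map_congr_left (g := fun k => ((data.filter (fun t => pvKI t == k)).length : Int)) (fun k _ => by
      simp only [Function.comp_apply, List.length_map])]
    exact pvPartitionAux (fun l => (l.length : Int)) (by simp)
      (fun l k => by
        have := pvLength_split (fun t => pvKI t == k) l
        push_cast [this]; ring)
      data.length data le_rfl
  rw [e1, e2, e3, e4]
  simp [pvScore]

-- ---- B side ----
lemma pvCount_append_one {α : Type} [BEq α] [LawfulBEq α] [DecidableEq α] (s : List α) (a z : α) :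
    (s ++ [a]).count z = s.count z + (if a = z then 1 else 0) := by
  by_cases h : a = z <;> simp [List.count_append, h]

lemma pvCross {α β : Type} [BEq β] [LawfulBEq β] [DecidableEq β] (k : α → β) (x : α)
    (seen xs : List α) :
    (xs.map (fun y => ((((seen ++ [x]).map k).count (k y) : Nat) : Int))).sum
      = (xs.map (fun y => (((seen.map k).count (k y) : Nat) : Int))).sum
        + (xs.countP (fun y => k x == k y) : Int) := by
  induction xs with
  | nil => simp
  | cons y ys ih =>
    simp only [List.map_cons, List.sum_cons, List.countP_cons]
    rw [ih]
    have hh : ((seen ++ [x]).map k).count (k y) = (seen.map k).count (k y) + (if k x = k y then 1 else 0) := by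
      rw [List.map_append, List.map_cons, List.map_nil, pvCount_append_one]
    rw [hh]
    by_cases h : k x = k y
    · simp only [h, if_pos rfl, beq_self_eq_true]
      push_cast; ring
    · have hb : (k x == k y) = false := beq_eq_false_iff_ne.mpr h
      simp only [if_neg h, hb]
      push_cast; ring

lemma pvB_loop (l : List (String × String × String)) :
    ∀ (seen : List (String × String × String)) (d1 : PySem.Dict (String × String) Int)
      (d2 : PySem.Dict String Int) (i c t tot : Int),
      (∀ z, d1.getD z 0 = ((seen.map pvKP).count z : Int)) →
      (∀ z, d2.getD z 0 = ((seen.map pvKI).count z : Int)) →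
      (l.foldl pvBStep (d1, d2, i, c, t, tot)).2.2 =
        (i + (l.map (fun y => ((seen.map pvKP).count (pvKP y) : Int))).sum + (pvPairCnt pvPeq l : Int),
         c + (l.map (fun y => ((seen.map pvKI).count (pvKI y) : Int))).sum + (pvPairCnt pvPit l : Int),
         t + (l.countP pvTie : Int),
         tot + (l.length : Int)) := by
  induction l with
  | nil => intro seen d1 d2 i c t tot h1 h2; simp
  | cons x xs ih =>
    intro seen d1 d2 i c t tot h1 h2
    rw [List.foldl_cons]
    show ((xs.foldl pvBStep (d1.insert (pvKP x) (d1.getD (pvKP x) 0 + 1),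
        d2.insert (pvKI x) (d2.getD (pvKI x) 0 + 1),
        i + d1.getD (pvKP x) 0, c + d2.getD (pvKI x) 0,
        if PySem.Str.isIn "=" x.2.2 then t + 1 else t, tot + 1))).2.2 = _
    rw [ih (seen ++ [x]) _ _ _ _ _ _
      (by
        intro z
        rw [PySem.Dict.getD_insert, List.map_append, List.map_cons, List.map_nil,
            pvCount_append_one]
        by_cases hz : z = pvKP x
        · subst hz; rw [if_pos rfl, if_pos rfl, h1]; push_cast; ring
        · rw [if_neg hz, if_neg (fun h => hz h.symm), h1]; push_cast; ring)
      (by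
        intro z
        rw [PySem.Dict.getD_insert, List.map_append, List.map_cons, List.map_nil,
            pvCount_append_one]
        by_cases hz : z = pvKI x
        · subst hz; rw [if_pos rfl, if_pos rfl, h2]; push_cast; ring
        · rw [if_neg hz, if_neg (fun h => hz h.symm), h2]; push_cast; ring)]
    rw [pvCross pvKP x seen xs, pvCross pvKI x seen xs]
    simp only [Prod.ext_iff, List.map_cons, List.sum_cons, List.countP_cons, List.length_cons,
      pvPairCnt, h1, h2]
    refine ⟨?_, ?_, ?_, ?_⟩
    · rw [show (fun y => pvKP x == pvKP y) = pvPeq x from rfl]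
      push_cast; ring
    · rw [show (fun y => pvKI x == pvKI y) = pvPit x from rfl]
      push_cast; ring
    · simp only [pvTie]
      simp only [PySem.Str.isIn_eq]
      split <;> push_cast <;> ring
    · push_cast; ring

lemma pvB_eq_score (data : List (String × String × String)) :
    compute_agreement_scores_alt data = pvScore data := by
  have h := pvB_loop data [] PySem.Dict.empty PySem.Dict.empty 0 0 0 0
    (fun z => by simp) (fun z => by simp)
  simp only [List.map_nil, List.count_nil, Nat.cast_zero, List.map_const, List.sum_replicate,
    smul_zero, add_zero, zero_add] at h
  show [(data.foldl pvBStep (PySem.Dict.empty, PySem.Dict.empty, 0, 0, 0, 0)).2.2.1,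
        (data.foldl pvBStep (PySem.Dict.empty, PySem.Dict.empty, 0, 0, 0, 0)).2.2.2.1,
        (data.foldl pvBStep (PySem.Dict.empty, PySem.Dict.empty, 0, 0, 0, 0)).2.2.2.2.1,
        (data.foldl pvBStep (PySem.Dict.empty, PySem.Dict.empty, 0, 0, 0, 0)).2.2.2.2.2] = pvScore data
  rw [h]
  simp [pvScore]

-- ===== VERDICT (by name: the statement is the Claim_ definition above) =====
theorem compute_agreement_scores_spec : Claim_equal_compute_agreement_scores := by
  intro data _
  unfold Spec_compute_agreement_scores
  rw [pvA_eq_score, pvB_eq_score]
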